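-- pv_equiv track=rewrite | github.com/nao1234g/vps-automation-openclaw | scripts/prediction_page_builder.py | _aggregate_score_tier
-- ===== SOURCE A (Python) =====
-- DEFAULT_PUBLIC_SCORE_TIER = "PROVISIONAL"
--
-- _VALID_SCORE_TIERS = {
--     "VERIFIED_OFFICIAL",
--     "MIGRATED_OFFICIAL",
--     "PROVISIONAL",
--     "NOT_SCORABLE",
-- }
--
-- def _normalize_score_tier(score_tier, brier=None):
--     tier = str(score_tier or "").strip().upper()
--     if tier in _VALID_SCORE_TIERS:
--         return tier
--     if brier is None:
--         return DEFAULT_PUBLIC_SCORE_TIER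
--     return DEFAULT_PUBLIC_SCORE_TIER
--
-- def _aggregate_score_tier(rows):
--     tiers = {
--         _normalize_score_tier(r.get("official_score_tier"), r.get("brier"))
--         for r in rows
--         if r.get("brier") is not None
--     }
--     tiers.discard("NOT_SCORABLE")
--     if not tiers:
--         return "NOT_SCORABLE"
--     if tiers == {"VERIFIED_OFFICIAL"}:
--         return "VERIFIED_OFFICIAL"
--     if tiers <= {"VERIFIED_OFFICIAL", "MIGRATED_OFFICIAL"}:
--         return "MIGRATED_OFFICIAL"
--     return "PROVISIONAL"
-- ===== SOURCE B (Python) =====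
-- DEFAULT_PUBLIC_SCORE_TIER = "PROVISIONAL"
--
-- _VALID_SCORE_TIERS = {
--     "VERIFIED_OFFICIAL",
--     "MIGRATED_OFFICIAL",
--     "PROVISIONAL",
--     "NOT_SCORABLE",
-- }
--
-- def _normalize_score_tier(score_tier, brier=None):
--     tier = str(score_tier or "").strip().upper()
--     if tier in _VALID_SCORE_TIERS:
--         return tier
--     if brier is None:
--         return DEFAULT_PUBLIC_SCORE_TIER
--     return DEFAULT_PUBLIC_SCORE_TIER
--
-- # Severity of a tier; anything not listed (i.e. PROVISIONAL) is the most severe.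
-- _TIER_RANK = {"NOT_SCORABLE": 0, "VERIFIED_OFFICIAL": 1, "MIGRATED_OFFICIAL": 2}
-- _LADDER = ("NOT_SCORABLE", "VERIFIED_OFFICIAL", "MIGRATED_OFFICIAL", "PROVISIONAL")
--
-- def _aggregate_score_tier(rows):
--     # Reduce to the maximum numeric severity over scorable rows (NOT_SCORABLE
--     # contributes 0, same as no row), then read the answer off the ladder.
--     best = max(
--         (_TIER_RANK.get(_normalize_score_tier(r.get("official_score_tier"), r.get("brier")), 3)
--          for r in rows
--          if r.get("brier") is not None),
--         default=0,
--     )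
--     return _LADDER[best]
-- ===== Notes on version B (the rewrite author's own statement) =====
-- stated objective: alternative
-- what changed: Replaces the set comprehension with discard and the chain of set-equality/subset tests by a max-reduction over a numeric severity ranking of each row's tier (NOT_SCORABLE=0, VERIFIED=1, MIGRATED=2, other=3), reading the result off a fixed ladder at the maximum rank.
import Mathlib
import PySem

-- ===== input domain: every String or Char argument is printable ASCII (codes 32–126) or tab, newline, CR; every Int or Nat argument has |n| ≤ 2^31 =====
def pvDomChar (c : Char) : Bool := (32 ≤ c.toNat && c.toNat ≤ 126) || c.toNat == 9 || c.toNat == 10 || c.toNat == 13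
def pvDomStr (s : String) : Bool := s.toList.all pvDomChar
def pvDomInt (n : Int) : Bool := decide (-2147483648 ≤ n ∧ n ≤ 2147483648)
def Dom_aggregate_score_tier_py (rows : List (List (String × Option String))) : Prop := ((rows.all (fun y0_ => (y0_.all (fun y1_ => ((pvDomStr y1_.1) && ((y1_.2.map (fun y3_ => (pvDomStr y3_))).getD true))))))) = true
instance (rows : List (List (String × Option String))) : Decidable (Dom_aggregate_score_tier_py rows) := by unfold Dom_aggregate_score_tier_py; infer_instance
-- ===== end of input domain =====

-- B replaces A's set-comprehension + set-equality/subset decision by a max-reduction over a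
-- numeric severity rank per row, reading the answer off a fixed ladder; same O(n) cost.

-- ===== PORT A =====
def DEFAULT_PUBLIC_SCORE_TIER : String := "PROVISIONAL"

def VALID_SCORE_TIERS : PySem.Set String :=
  PySem.Set.ofList ["VERIFIED_OFFICIAL", "MIGRATED_OFFICIAL", "PROVISIONAL", "NOT_SCORABLE"]

-- r.get(k): missing key or stored None both give Python None
def pvRowGet (r : List (String × Option String)) (k : String) : Option String :=
  (PySem.Dict.get? (PySem.Dict.mk r) k).getD none

def normalize_score_tier (score_tier : Option String) (brier : Option String) : String :=
  let tier := PySem.Str.upper (PySem.Str.strip (score_tier.getD ""))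
  if VALID_SCORE_TIERS.contains tier then tier
  else if brier = none then DEFAULT_PUBLIC_SCORE_TIER
  else DEFAULT_PUBLIC_SCORE_TIER

def aggregate_score_tier_py (rows : List (List (String × Option String))) : String :=
  let tiers : PySem.Set String :=
    rows.foldl (fun s r =>
      if pvRowGet r "brier" ≠ none then
        PySem.Set.add s (normalize_score_tier (pvRowGet r "official_score_tier") (pvRowGet r "brier"))
      else s) PySem.Set.empty
  let tiers2 := PySem.Set.discard tiers "NOT_SCORABLE"
  if tiers2 = [] then "NOT_SCORABLE"
  else if PySem.Set.equal tiers2 (PySem.Set.ofList ["VERIFIED_OFFICIAL"]) then "VERIFIED_OFFICIAL"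
  else if PySem.Set.issubset tiers2 (PySem.Set.ofList ["VERIFIED_OFFICIAL", "MIGRATED_OFFICIAL"]) then "MIGRATED_OFFICIAL"
  else "PROVISIONAL"

-- ===== PORT B =====
def TIER_RANK : PySem.Dict String Nat :=
  PySem.Dict.mk [("NOT_SCORABLE", 0), ("VERIFIED_OFFICIAL", 1), ("MIGRATED_OFFICIAL", 2)]

def LADDER : List String := ["NOT_SCORABLE", "VERIFIED_OFFICIAL", "MIGRATED_OFFICIAL", "PROVISIONAL"]

-- max(gen, default=0): the generator's elements as a filterMap, folded with max from 0.
-- _LADDER[best]: best is always 0..3, so the tuple index never fails; getD's default is unreachable.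
def aggregate_score_tier_py_alt (rows : List (List (String × Option String))) : String :=
  let ranks : List Nat :=
    rows.filterMap (fun r =>
      if pvRowGet r "brier" = none then none
      else some (PySem.Dict.getD TIER_RANK (normalize_score_tier (pvRowGet r "official_score_tier") (pvRowGet r "brier")) 3))
  let best := ranks.foldl Nat.max 0
  (PySem.List.pyGet? LADDER (best : Int)).getD DEFAULT_PUBLIC_SCORE_TIER

-- ===== PRECONDITION & SPEC =====
def Spec_aggregate_score_tier_py (rows : List (List (String × Option String))) (out : String) : Prop := out = aggregate_score_tier_py_alt rows
instance (rows : List (List (String × Option String))) (out : String) : Decidable (Spec_aggregate_score_tier_py rows out) := by unfold Spec_aggregate_score_tier_py; infer_instance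

-- ===== CLAIM (what is proved, stated in full; the proofs are below) =====
def Claim_equal_aggregate_score_tier_py : Prop := ∀ (rows : List (List (String × Option String))), Dom_aggregate_score_tier_py rows → Spec_aggregate_score_tier_py rows (aggregate_score_tier_py rows)

-- ===== LEMMAS AND PROOFS =====

def pvStepA : PySem.Set String → List (String × Option String) → PySem.Set String :=
  fun s r =>
    if pvRowGet r "brier" ≠ none then
      PySem.Set.add s (normalize_score_tier (pvRowGet r "official_score_tier") (pvRowGet r "brier"))
    else s

def pvDecA (tiers : PySem.Set String) : String :=
  let tiers2 := PySem.Set.discard tiers "NOT_SCORABLE"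
  if tiers2 = [] then "NOT_SCORABLE"
  else if PySem.Set.equal tiers2 (PySem.Set.ofList ["VERIFIED_OFFICIAL"]) then "VERIFIED_OFFICIAL"
  else if PySem.Set.issubset tiers2 (PySem.Set.ofList ["VERIFIED_OFFICIAL", "MIGRATED_OFFICIAL"]) then "MIGRATED_OFFICIAL"
  else "PROVISIONAL"

def pvRankRow (r : List (String × Option String)) : Option Nat :=
  if pvRowGet r "brier" = none then none
  else some (PySem.Dict.getD TIER_RANK (normalize_score_tier (pvRowGet r "official_score_tier") (pvRowGet r "brier")) 3)

-- severity rank of a set of normalized tiers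
def pvRk (s : PySem.Set String) : Nat :=
  if "PROVISIONAL" ∈ s then 3
  else if "MIGRATED_OFFICIAL" ∈ s then 2
  else if "VERIFIED_OFFICIAL" ∈ s then 1
  else 0

lemma pv_norm_mem (st b : Option String) :
    normalize_score_tier st b = "VERIFIED_OFFICIAL" ∨ normalize_score_tier st b = "MIGRATED_OFFICIAL" ∨
    normalize_score_tier st b = "PROVISIONAL" ∨ normalize_score_tier st b = "NOT_SCORABLE" := by
  unfold normalize_score_tier
  have dV : ("VERIFIED_OFFICIAL" : String) ∈ VALID_SCORE_TIERS := by decide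
  have dM : ("MIGRATED_OFFICIAL" : String) ∈ VALID_SCORE_TIERS := by decide
  have dP : ("PROVISIONAL" : String) ∈ VALID_SCORE_TIERS := by decide
  have dN : ("NOT_SCORABLE" : String) ∈ VALID_SCORE_TIERS := by decide
  by_cases hmem : PySem.Str.upper (PySem.Str.strip (st.getD "")) ∈ VALID_SCORE_TIERS
  · have hm' := hmem
    unfold VALID_SCORE_TIERS at hm'
    rw [PySem.Set.mem_ofList _ _] at hm'
    simp only [List.mem_cons, List.not_mem_nil, or_false] at hm'
    rcases hm' with h | h | h | h <;> simp [h, dV, dM, dP, dN]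
  · simp [hmem, DEFAULT_PUBLIC_SCORE_TIER]

lemma pv_rk_add (s : PySem.Set String) (t : String)
    (ht : t = "VERIFIED_OFFICIAL" ∨ t = "MIGRATED_OFFICIAL" ∨ t = "PROVISIONAL" ∨ t = "NOT_SCORABLE") :
    pvRk (PySem.Set.add s t) = Nat.max (pvRk s) (PySem.Dict.getD TIER_RANK t 3) := by
  unfold pvRk
  rcases ht with h | h | h | h <;> subst h <;>
    simp only [PySem.Set.mem_add] <;>
    by_cases hp : "PROVISIONAL" ∈ s <;>
    by_cases hm : "MIGRATED_OFFICIAL" ∈ s <;>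
    by_cases hv : "VERIFIED_OFFICIAL" ∈ s <;>
    simp [hp, hm, hv, TIER_RANK, PySem.Dict.getD, PySem.Dict.get?]

lemma pv_loop_rank (rows : List (List (String × Option String))) :
    ∀ (s : PySem.Set String),
      (∀ x ∈ s, x = "VERIFIED_OFFICIAL" ∨ x = "MIGRATED_OFFICIAL" ∨ x = "PROVISIONAL" ∨ x = "NOT_SCORABLE") →
      pvRk (rows.foldl pvStepA s) = (rows.filterMap pvRankRow).foldl Nat.max (pvRk s) := by
  induction rows with
  | nil => intro s _; simp
  | cons r rows ih =>
      intro s hr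
      simp only [List.foldl_cons, List.filterMap_cons]
      by_cases hb : pvRowGet r "brier" = none
      · have hA : pvStepA s r = s := by unfold pvStepA; simp [hb]
        have hB : pvRankRow r = none := by unfold pvRankRow; simp [hb]
        rw [hA, hB]; exact ih s hr
      · have hA : pvStepA s r = PySem.Set.add s (normalize_score_tier (pvRowGet r "official_score_tier") (pvRowGet r "brier")) := by
          unfold pvStepA; simp [hb]
        have hB : pvRankRow r = some (PySem.Dict.getD TIER_RANK (normalize_score_tier (pvRowGet r "official_score_tier") (pvRowGet r "brier")) 3) := by
          unfold pvRankRow; simp [hb]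
        have hr' : ∀ x ∈ PySem.Set.add s (normalize_score_tier (pvRowGet r "official_score_tier") (pvRowGet r "brier")),
            x = "VERIFIED_OFFICIAL" ∨ x = "MIGRATED_OFFICIAL" ∨ x = "PROVISIONAL" ∨ x = "NOT_SCORABLE" := by
          intro x hx
          rw [PySem.Set.mem_add] at hx
          rcases hx with hx | hx
          · exact hr x hx
          · rw [hx]; exact pv_norm_mem _ _
        rw [hA, hB]
        simp only [List.foldl_cons]
        rw [ih _ hr', pv_rk_add s _ (pv_norm_mem _ _)]

lemma pv_dec_rank (s : PySem.Set String)
    (hr : ∀ x ∈ s, x = "VERIFIED_OFFICIAL" ∨ x = "MIGRATED_OFFICIAL" ∨ x = "PROVISIONAL" ∨ x = "NOT_SCORABLE") :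
    pvDecA s = (PySem.List.pyGet? LADDER ((pvRk s : Int))).getD DEFAULT_PUBLIC_SCORE_TIER := by
  unfold pvDecA pvRk
  by_cases hp : "PROVISIONAL" ∈ s
  · have hpm : "PROVISIONAL" ∈ PySem.Set.discard s "NOT_SCORABLE" := by
      rw [PySem.Set.mem_discard]; exact ⟨hp, by decide⟩
    have hne : ¬ (PySem.Set.discard s "NOT_SCORABLE" = []) := by
      intro h; rw [h] at hpm; exact (List.not_mem_nil) hpm
    have heq : PySem.Set.equal (PySem.Set.discard s "NOT_SCORABLE") (PySem.Set.ofList ["VERIFIED_OFFICIAL"]) = false := by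
      cases h : PySem.Set.equal (PySem.Set.discard s "NOT_SCORABLE") (PySem.Set.ofList ["VERIFIED_OFFICIAL"]) with
      | true =>
          have := ((PySem.Set.equal_iff _ _).mp h "PROVISIONAL").mp hpm
          rw [PySem.Set.mem_ofList _ _] at this
          simp at this
      | false => rfl
    have hsub : PySem.Set.issubset (PySem.Set.discard s "NOT_SCORABLE") (PySem.Set.ofList ["VERIFIED_OFFICIAL", "MIGRATED_OFFICIAL"]) = false := by
      cases h : PySem.Set.issubset (PySem.Set.discard s "NOT_SCORABLE") (PySem.Set.ofList ["VERIFIED_OFFICIAL", "MIGRATED_OFFICIAL"]) with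
      | true =>
          have := (PySem.Set.issubset_iff _ _).mp h "PROVISIONAL" hpm
          rw [PySem.Set.mem_ofList _ _] at this
          simp at this
      | false => rfl
    simp [hne, heq, hsub, hp, PySem.List.pyGet?, PySem.List.pyIdx?, LADDER, DEFAULT_PUBLIC_SCORE_TIER]
  · by_cases hm : "MIGRATED_OFFICIAL" ∈ s
    · have hmm : "MIGRATED_OFFICIAL" ∈ PySem.Set.discard s "NOT_SCORABLE" := by
        rw [PySem.Set.mem_discard]; exact ⟨hm, by decide⟩
      have hne : ¬ (PySem.Set.discard s "NOT_SCORABLE" = []) := by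
        intro h; rw [h] at hmm; exact (List.not_mem_nil) hmm
      have heq : PySem.Set.equal (PySem.Set.discard s "NOT_SCORABLE") (PySem.Set.ofList ["VERIFIED_OFFICIAL"]) = false := by
        cases h : PySem.Set.equal (PySem.Set.discard s "NOT_SCORABLE") (PySem.Set.ofList ["VERIFIED_OFFICIAL"]) with
        | true =>
            have := ((PySem.Set.equal_iff _ _).mp h "MIGRATED_OFFICIAL").mp hmm
            rw [PySem.Set.mem_ofList _ _] at this
            simp at this
        | false => rfl
      have hsub : PySem.Set.issubset (PySem.Set.discard s "NOT_SCORABLE") (PySem.Set.ofList ["VERIFIED_OFFICIAL", "MIGRATED_OFFICIAL"]) = true := by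
        rw [PySem.Set.issubset_iff]
        intro x hx
        rw [PySem.Set.mem_discard] at hx
        rw [PySem.Set.mem_ofList _ _]
        rcases hr x hx.1 with h | h | h | h
        · simp [h]
        · simp [h]
        · exact absurd (h ▸ hx.1) hp
        · exact absurd h hx.2
      simp [hne, heq, hsub, hp, hm, PySem.List.pyGet?, PySem.List.pyIdx?, LADDER]
    · by_cases hv : "VERIFIED_OFFICIAL" ∈ s
      · have hvm : "VERIFIED_OFFICIAL" ∈ PySem.Set.discard s "NOT_SCORABLE" := by
          rw [PySem.Set.mem_discard]; exact ⟨hv, by decide⟩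
        have hne : ¬ (PySem.Set.discard s "NOT_SCORABLE" = []) := by
          intro h; rw [h] at hvm; exact (List.not_mem_nil) hvm
        have heq : PySem.Set.equal (PySem.Set.discard s "NOT_SCORABLE") (PySem.Set.ofList ["VERIFIED_OFFICIAL"]) = true := by
          rw [PySem.Set.equal_iff]
          intro x
          rw [PySem.Set.mem_discard, PySem.Set.mem_ofList _ _]
          constructor
          · rintro ⟨hx, hxn⟩
            rcases hr x hx with h | h | h | h
            · simp [h]
            · exact absurd (h ▸ hx) hm
            · exact absurd (h ▸ hx) hp
            · exact absurd h hxn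
          · intro h
            simp only [List.mem_cons, List.not_mem_nil, or_false] at h
            exact ⟨h ▸ hv, by rw [h]; decide⟩
        simp [hne, heq, hp, hm, hv, PySem.List.pyGet?, PySem.List.pyIdx?, LADDER]
      · have hnil : PySem.Set.discard s "NOT_SCORABLE" = [] := by
          rw [List.eq_nil_iff_forall_not_mem]
          intro x hx
          rw [PySem.Set.mem_discard] at hx
          rcases hr x hx.1 with h | h | h | h
          · exact hv (h ▸ hx.1)
          · exact hm (h ▸ hx.1)
          · exact hp (h ▸ hx.1)
          · exact hx.2 h
        simp [hnil, hp, hm, hv, PySem.List.pyGet?, PySem.List.pyIdx?, LADDER]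

lemma pv_final_mem (rows : List (List (String × Option String))) :
    ∀ (s : PySem.Set String),
      (∀ x ∈ s, x = "VERIFIED_OFFICIAL" ∨ x = "MIGRATED_OFFICIAL" ∨ x = "PROVISIONAL" ∨ x = "NOT_SCORABLE") →
      ∀ x ∈ rows.foldl pvStepA s,
        x = "VERIFIED_OFFICIAL" ∨ x = "MIGRATED_OFFICIAL" ∨ x = "PROVISIONAL" ∨ x = "NOT_SCORABLE" := by
  induction rows with
  | nil => intro s hr; simpa using hr
  | cons r rows ih =>
      intro s hr
      simp only [List.foldl_cons]
      apply ih
      intro x hx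
      unfold pvStepA at hx
      by_cases hb : pvRowGet r "brier" = none
      · simp [hb] at hx; exact hr x hx
      · simp [hb, PySem.Set.mem_add] at hx
        rcases hx with hx | hx
        · exact hr x hx
        · rw [hx]; exact pv_norm_mem _ _

-- ===== VERDICT (by name: the statement is the Claim_ definition above) =====
theorem aggregate_score_tier_py_spec : Claim_equal_aggregate_score_tier_py := by
  intro rows _
  unfold Spec_aggregate_score_tier_py aggregate_score_tier_py aggregate_score_tier_py_alt
  have h0 : ∀ x ∈ (PySem.Set.empty : PySem.Set String),
      x = "VERIFIED_OFFICIAL" ∨ x = "MIGRATED_OFFICIAL" ∨ x = "PROVISIONAL" ∨ x = "NOT_SCORABLE" := by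
    intro x hx; simp [PySem.Set.empty] at hx
  have hfinal := pv_final_mem rows PySem.Set.empty h0
  have hloop := pv_loop_rank rows PySem.Set.empty h0
  have hrk0 : pvRk PySem.Set.empty = 0 := by unfold pvRk; simp [PySem.Set.empty]
  rw [hrk0] at hloop
  have hdec := pv_dec_rank (rows.foldl pvStepA PySem.Set.empty) hfinal
  show pvDecA (rows.foldl pvStepA PySem.Set.empty) = _
  rw [hdec, hloop]
  rfl
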